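-- pv_equiv track=rewrite | github.com/svoi-fr/ino | app/document.py | text_to_markdown
-- ===== SOURCE A (Python) =====
-- def text_to_markdown(text: str) -> str:
--     if not text:
--         return ""
--
--     # Split into lines
--     lines = text.split('\n')
--
--     # Process each line
--     markdown_lines = []
--     in_paragraph = False
--
--     for line in lines:
--         line = line.strip()
--
--         if not line:
--             if in_paragraph:
--                 markdown_lines.append('')
--                 in_paragraph = False
--             continue
--
--         # Detect potential headers
--         if line.isupper() and len(line) > 3:
--             if in_paragraph:
--                 markdown_lines.append('')
--                 in_paragraph = False
--             markdown_lines.append(f'## {line.title()}')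
--             continue
--
--         # Regular text
--         if in_paragraph:
--             markdown_lines.append(line)
--         else:
--             in_paragraph = True
--             markdown_lines.append(line)
--
--     return '\n'.join(markdown_lines)
-- ===== SOURCE B (Python) =====
-- def text_to_markdown(text: str) -> str:
--     if not text:
--         return ""
--     stripped = [ln.strip() for ln in text.split('\n')]
--     # First pass: group stripped lines into blocks.
--     # ('h', [line])  = header;  ('p', lines) = paragraph followed by more input
--     # (gets a blank separator);  ('P', lines) = paragraph running to end of input.
--     blocks = []
--     i, n = 0, len(stripped)
--     while i < n:
--         ln = stripped[i]
--         if not ln: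
--             i += 1
--         elif ln.isupper() and len(ln) > 3:
--             blocks.append(('h', [ln]))
--             i += 1
--         else:
--             j = i
--             while j < n and stripped[j] and not (stripped[j].isupper() and len(stripped[j]) > 3):
--                 j += 1
--             blocks.append(('p' if j < n else 'P', stripped[i:j]))
--             i = j
--     # Second pass: render the blocks.
--     out = []
--     for kind, ls in blocks:
--         if kind == 'h':
--             out.append('## ' + ls[0].title())
--         else:
--             out.extend(ls)
--             if kind == 'p':
--                 out.append('')
--     return '\n'.join(out)
-- ===== Notes on version B (the rewrite author's own statement) =====
-- stated objective: alternative
-- what changed: Replaces A's flag-driven single pass (in_paragraph boolean threaded through one loop) with a two-pass build-blocks-then-render decomposition: first group stripped lines into header/paragraph blocks (recording whether a paragraph is followed by more input), then render the block list.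
import Mathlib
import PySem

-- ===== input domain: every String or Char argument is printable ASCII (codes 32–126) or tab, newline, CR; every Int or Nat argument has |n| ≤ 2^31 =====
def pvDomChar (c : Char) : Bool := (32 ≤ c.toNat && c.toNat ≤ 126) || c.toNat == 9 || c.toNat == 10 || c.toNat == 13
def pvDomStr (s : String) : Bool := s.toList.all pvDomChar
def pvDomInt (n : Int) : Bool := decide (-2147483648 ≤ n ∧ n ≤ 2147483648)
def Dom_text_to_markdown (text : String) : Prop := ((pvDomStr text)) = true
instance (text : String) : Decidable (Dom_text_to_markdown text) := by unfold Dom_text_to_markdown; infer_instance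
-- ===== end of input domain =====

-- B replaces A's flag-driven single pass by a build-blocks-then-render two-pass decomposition (objective: alternative, same cost).

-- shared hand ports of Python builtins not in PySem (exact on the ASCII domain):
-- str.isupper(): no lowercase letter and at least one uppercase letter (ASCII cased chars = letters)
def pyIsUpperStr (s : String) : Bool :=
  s.toList.any PySem.Chars.isupper && !(s.toList.any PySem.Chars.islower)

-- str.title(): a letter after a non-letter is uppercased, a letter after a letter lowercased, others kept
def pyTitleChars : List Char → Bool → List Char
  | [], _ => []
  | c :: cs, prevAlpha =>
    (if PySem.Chars.isalpha c then
       (if prevAlpha then PySem.Chars.lowerChar c else PySem.Chars.upperChar c)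
     else c) :: pyTitleChars cs (PySem.Chars.isalpha c)

def pyTitle (s : String) : String := String.ofList (pyTitleChars s.toList false)

-- text.split('\n') (sep nonempty, so exactly PySem.Chars.splitOn)
def pySplitNL (text : String) : List String :=
  (PySem.Chars.splitOn text.toList "\n".toList).map String.ofList

-- ===== PORT A =====
-- A's loop body, on state (markdown_lines, in_paragraph)
def stepA (st : List String × Bool) (raw : String) : List String × Bool :=
  let acc := st.1
  let inPara := st.2
  let line := PySem.Str.strip raw
  if line = "" then
    if inPara then (acc ++ [""], false) else (acc, inPara)
  else if pyIsUpperStr line && decide (3 < PySem.Str.len line) then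
    let acc' := if inPara then acc ++ [""] else acc
    (acc' ++ ["## " ++ pyTitle line], false)
  else
    (acc ++ [line], true)

def text_to_markdown (text : String) : String :=
  if text = "" then ""
  else
    let lines := pySplitNL text
    let res := lines.foldl stepA ([], false)
    PySem.Str.join "\n" res.1

-- ===== PORT B =====
def bIsHeader (l : String) : Bool := pyIsUpperStr l && decide (3 < PySem.Str.len l)

def bIsText (l : String) : Bool := !(l = "") && !(bIsHeader l)

-- first pass of Source B: group stripped lines into blocks ('h' header, 'p' paragraph
-- with further input behind it, 'P' paragraph running to end of input)
def bBlocks : List String → List (Char × List String)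
  | [] => []
  | l :: rest =>
    if l = "" then bBlocks rest
    else if bIsHeader l then ('h', [l]) :: bBlocks rest
    else
      let para := (l :: rest).takeWhile bIsText
      let rest' := (l :: rest).dropWhile bIsText
      ((if rest' = [] then 'P' else 'p'), para) :: bBlocks rest'
  termination_by ls => ls.length
  decreasing_by
    · simp
    · simp
    · simp only [List.dropWhile]
      split
      · exact Nat.lt_succ_of_le (List.length_dropWhile_le _ _)
      · simp_all [bIsText]

-- second pass of Source B: render the blocks
def bRender : List (Char × List String) → List String
  | [] => []
  | (k, ls) :: bs =>
    if k = 'h' then ("## " ++ pyTitle (ls.headD "")) :: bRender bs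
    else ls ++ (if k = 'p' then [""] else []) ++ bRender bs

def text_to_markdown_alt (text : String) : String :=
  if text = "" then ""
  else
    let stripped := (pySplitNL text).map PySem.Str.strip
    PySem.Str.join "\n" (bRender (bBlocks stripped))

-- ===== PRECONDITION & SPEC =====
def Spec_text_to_markdown (text : String) (out : String) : Prop := out = text_to_markdown_alt text
instance (text : String) (out : String) : Decidable (Spec_text_to_markdown text out) := by unfold Spec_text_to_markdown; infer_instance

-- ===== CLAIM (what is proved, stated in full; the proofs are below) =====
def Claim_equal_text_to_markdown : Prop := ∀ (text : String), Dom_text_to_markdown text → Spec_text_to_markdown text (text_to_markdown text)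

-- ===== LEMMAS AND PROOFS =====

-- A's loop, rephrased as structural recursion over the already-stripped lines
def loopS : List String → Bool → List String
  | [], _ => []
  | l :: rest, inPara =>
    if l = "" then
      (if inPara then "" :: loopS rest false else loopS rest false)
    else if bIsHeader l then
      (if inPara then "" :: ("## " ++ pyTitle l) :: loopS rest false
       else ("## " ++ pyTitle l) :: loopS rest false)
    else l :: loopS rest true

theorem foldA_eq_loopS (raws : List String) (acc : List String) (b : Bool) :
    (raws.foldl stepA (acc, b)).1 = acc ++ loopS (raws.map PySem.Str.strip) b := by
  induction raws generalizing acc b with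
  | nil => simp [loopS]
  | cons raw rest ih =>
    rw [List.foldl_cons, List.map_cons]
    by_cases h1 : PySem.Str.strip raw = ""
    · cases b with
      | false =>
        have hs : stepA (acc, false) raw = (acc, false) := by simp [stepA, h1]
        rw [hs, ih]; simp [loopS, h1]
      | true =>
        have hs : stepA (acc, true) raw = (acc ++ [""], false) := by simp [stepA, h1]
        rw [hs, ih]; simp [loopS, h1]
    · by_cases h2 : (pyIsUpperStr (PySem.Str.strip raw) && decide (3 < PySem.Str.len (PySem.Str.strip raw))) = true
      · have hH : bIsHeader (PySem.Str.strip raw) = true := h2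
        cases b with
        | false =>
          have hs : stepA (acc, false) raw
              = (acc ++ ["## " ++ pyTitle (PySem.Str.strip raw)], false) := by
            simp only [stepA]
            rw [if_neg h1, if_pos h2]
            simp
          rw [hs, ih]; simp [loopS, h1, hH]
        | true =>
          have hs : stepA (acc, true) raw
              = (acc ++ ["", "## " ++ pyTitle (PySem.Str.strip raw)], false) := by
            simp only [stepA]
            rw [if_neg h1, if_pos h2]
            simp
          rw [hs, ih]; simp [loopS, h1, hH]
      · have hH : bIsHeader (PySem.Str.strip raw) = false := by
          unfold bIsHeader; exact Bool.eq_false_iff.mpr h2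
        cases b with
        | false =>
          have hs : stepA (acc, false) raw = (acc ++ [PySem.Str.strip raw], true) := by
            simp only [stepA]
            rw [if_neg h1, if_neg h2]
          rw [hs, ih]; simp [loopS, h1, hH]
        | true =>
          have hs : stepA (acc, true) raw = (acc ++ [PySem.Str.strip raw], true) := by
            simp only [stepA]
            rw [if_neg h1, if_neg h2]
          rw [hs, ih]; simp [loopS, h1, hH]

theorem loopS_true (ts : List String) :
    loopS ts true = ts.takeWhile bIsText ++
      (if ts.dropWhile bIsText = [] then []
       else "" :: loopS (ts.dropWhile bIsText) false) := by
  induction ts with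
  | nil => simp [loopS]
  | cons l rest ih =>
    by_cases ht : bIsText l = true
    · have h1 : ¬ l = "" := by simp [bIsText] at ht; intro h; exact absurd h ht.1
      have h2 : bIsHeader l = false := by simp [bIsText] at ht; exact ht.2
      simp [loopS, h1, h2, ht, ih]
    · have ht' : bIsText l = false := by simpa using ht
      simp only [List.takeWhile_cons, List.dropWhile_cons, ht']
      simp only [Bool.false_eq_true, List.nil_append, List.cons_ne_nil, if_neg,
        not_false_iff]
      by_cases h1 : l = ""
      · simp [loopS, h1]
      · have h2 : bIsHeader l = true := by
          simp [bIsText, h1] at ht'; simpa using ht'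
        simp [loopS, h1, h2]

theorem loopS_eq_render (ts : List String) :
    loopS ts false = bRender (bBlocks ts) := by
  induction ts using bBlocks.induct with
  | case1 => simp [loopS, bBlocks, bRender]
  | case2 rest ih => simp [loopS, bBlocks, ih]
  | case3 l rest h1 h2 ih => simp [loopS, bBlocks, bRender, h1, h2, ih]
  | case4 l rest h1 h2 rest'' ih0 =>
    have ih : loopS (List.dropWhile bIsText (l :: rest)) false
        = bRender (bBlocks (List.dropWhile bIsText (l :: rest))) := ih0
    have ht : bIsText l = true := by simp [bIsText, h1, h2]
    have hloop : loopS (l :: rest) false = l :: loopS rest true := by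
      simp [loopS, h1, h2]
    rw [hloop, loopS_true]
    have htw : (l :: rest).takeWhile bIsText = l :: rest.takeWhile bIsText := by
      simp [ht]
    have hdw : (l :: rest).dropWhile bIsText = rest.dropWhile bIsText := by
      simp [ht]
    rw [bBlocks]
    simp only [h1, if_neg, h2, Bool.false_eq_true, not_false_iff]
    rw [hdw] at ih
    rw [hdw, htw]
    by_cases he : List.dropWhile bIsText rest = []
    · simp [he, bRender, bBlocks]
    · simp only [he, if_neg, bRender, not_false_iff]
      have hch : ('p' : Char) ≠ 'h' := by decide
      simp [hch, ← ih]

-- ===== VERDICT (by name: the statement is the Claim_ definition above) =====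
theorem text_to_markdown_spec : Claim_equal_text_to_markdown := by
  intro text _
  unfold Spec_text_to_markdown text_to_markdown text_to_markdown_alt
  by_cases h : text = ""
  · simp [h]
  · simp only [h, if_neg, not_false_iff]
    rw [foldA_eq_loopS, loopS_eq_render]
    simp
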